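-- pv_equiv track=rewrite | github.com/Round96/leetcode-py | solutions/string/hard/Regular_Expression_Matching.py | splitPatternIntoMinorPattern
-- ===== SOURCE A (Python) =====
-- def splitPatternIntoMinorPattern(p: str):
--     patterns = []
--     length = len(p)
--     index = 0
--     while index < length:
--         if index != length - 1:
--             if p[index + 1] == '*':
--                 patterns.append(p[index: index + 2])
--                 index += 2
--             else:
--                 patterns.append(p[index])
--                 index += 1
--         else:
--             patterns.append(p[index])
--             index += 1
--     return patterns
-- ===== SOURCE B (Python) =====
-- def splitPatternIntoMinorPattern(p: str):
--     out = []
--     pending = None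
--     for c in p:
--         if pending is not None:
--             if c == '*':
--                 out.append(pending + '*')
--                 pending = None
--             else:
--                 out.append(pending)
--                 pending = c
--         else:
--             pending = c
--     if pending is not None:
--         out.append(pending)
--     return out
-- ===== Notes on version B (the rewrite author's own statement) =====
-- stated objective: alternative
-- what changed: Replaces the index-based while-loop with lookahead (p[index+1]) and a special last-character branch by a single for-each state machine that carries one pending character, emits a token when the next character arrives, and flushes the pending character at the end.
import Mathlib
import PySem

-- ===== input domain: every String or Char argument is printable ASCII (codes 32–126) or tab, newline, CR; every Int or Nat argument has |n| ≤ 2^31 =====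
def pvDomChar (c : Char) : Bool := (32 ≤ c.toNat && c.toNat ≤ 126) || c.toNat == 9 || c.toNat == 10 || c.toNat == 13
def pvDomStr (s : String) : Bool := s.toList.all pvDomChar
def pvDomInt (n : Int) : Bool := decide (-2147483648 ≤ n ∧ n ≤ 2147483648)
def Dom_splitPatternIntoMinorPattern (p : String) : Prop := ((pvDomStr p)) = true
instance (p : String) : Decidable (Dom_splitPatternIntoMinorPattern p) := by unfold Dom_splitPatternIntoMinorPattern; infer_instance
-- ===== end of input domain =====

-- B replaces A's index-based while-loop with lookahead by a per-character state machine
-- carrying one pending character (objective: alternative decomposition, same cost).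

-- ===== PORT A =====
-- A's while-loop: index, length, and the growing `patterns` list are the loop state.
-- Indices are always ≥ 0 here, so the loop counter is ported as Nat; the in-range
-- indexings p[index], p[index+1] and the slice p[index:index+2] are ported exactly by
-- List.getD / drop-take on p.toList (the guards keep every access in range).
def splitLoopA (cs : List Char) (length : Nat) (index : Nat) (patterns : List String) : List String :=
  if index < length then
    if index ≠ length - 1 then
      if cs.getD (index + 1) ' ' = '*' then
        splitLoopA cs length (index + 2) (patterns ++ [String.mk ((cs.drop index).take 2)])
      else
        splitLoopA cs length (index + 1) (patterns ++ [String.mk ((cs.drop index).take 1)])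
    else
      splitLoopA cs length (index + 1) (patterns ++ [String.mk ((cs.drop index).take 1)])
  else patterns
termination_by length - index

def splitPatternIntoMinorPattern (p : String) : List String :=
  splitLoopA p.toList p.toList.length 0 []

-- ===== PORT B =====
-- one step of B's for-loop: state = (out, pending)
def stepB (st : List String × Option Char) (c : Char) : List String × Option Char :=
  match st with
  | (out, some pend) =>
    if c = '*' then (out ++ [String.mk [pend, '*']], none)
    else (out ++ [String.mk [pend]], some c)
  | (out, none) => (out, some c)

-- B's code after the loop: flush the pending character
def finishB (st : List String × Option Char) : List String :=
  match st.2 with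
  | some pend => st.1 ++ [String.mk [pend]]
  | none => st.1

def splitPatternIntoMinorPattern_alt (p : String) : List String :=
  finishB (p.toList.foldl stepB ([], none))

-- ===== PRECONDITION & SPEC =====
def Spec_splitPatternIntoMinorPattern (p : String) (out : List String) : Prop := out = splitPatternIntoMinorPattern_alt p
instance (p : String) (out : List String) : Decidable (Spec_splitPatternIntoMinorPattern p out) := by unfold Spec_splitPatternIntoMinorPattern; infer_instance

-- ===== CLAIM (what is proved, stated in full; the proofs are below) =====
def Claim_equal_splitPatternIntoMinorPattern : Prop := ∀ (p : String), Dom_splitPatternIntoMinorPattern p → Spec_splitPatternIntoMinorPattern p (splitPatternIntoMinorPattern p)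

-- ===== LEMMAS AND PROOFS =====

-- Loop invariant: from any index, A's loop computes B's fold-and-flush over the suffix.
theorem splitLoopA_eq_fold (n : Nat) : ∀ (cs : List Char) (index : Nat) (acc : List String),
    cs.length ≤ index + n →
    splitLoopA cs cs.length index acc = finishB ((cs.drop index).foldl stepB (acc, none)) := by
  induction n with
  | zero =>
    intro cs index acc h
    have hge : cs.length ≤ index := by omega
    have hd : cs.drop index = [] := List.drop_eq_nil_iff.mpr hge
    rw [splitLoopA, hd]
    simp [finishB, Nat.not_lt.mpr hge]
  | succ n ih =>
    intro cs index acc h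
    cases hd : cs.drop index with
    | nil =>
      have hge : cs.length ≤ index := List.drop_eq_nil_iff.mp hd
      rw [splitLoopA, hd]
      simp [finishB, Nat.not_lt.mpr hge]
    | cons c tail =>
      have hlen : cs.length - index = tail.length + 1 := by
        have := congrArg List.length hd
        simpa using this
      have hlt : index < cs.length := by omega
      have hdrop1 : cs.drop (index + 1) = tail := by
        have : cs.drop (index + 1) = (cs.drop index).drop 1 := by
          rw [List.drop_drop]
        simp [this, hd]
      cases htail : tail with
      | nil =>
        -- index is the last position
        have h0 : tail.length = 0 := by rw [htail]; rfl
        have hne : ¬ (index ≠ cs.length - 1) := by omega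
        rw [splitLoopA, if_pos hlt, if_neg hne]
        rw [ih cs (index + 1) _ (by omega)]
        rw [hdrop1, htail, hd]
        simp [finishB, stepB, List.foldl]
      | cons c2 rest =>
        have hget : cs.getD (index + 1) ' ' = c2 := by
          have h0 : (cs.drop (index + 1))[0]? = some c2 := by
            rw [hdrop1, htail]; rfl
          have h1 : cs[index + 1]? = some c2 := by
            rw [List.getElem?_drop] at h0
            simpa using h0
          simp [List.getD, h1]
        have h2 : tail.length = rest.length + 1 := by rw [htail]; simp
        have hne : index ≠ cs.length - 1 := by omega
        rw [splitLoopA, if_pos hlt, if_pos hne, hget]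
        by_cases hstar : c2 = '*'
        · rw [if_pos hstar]
          have hdrop2 : cs.drop (index + 2) = rest := by
            have heq : cs.drop (index + 2) = (cs.drop (index + 1)).drop 1 := by
              rw [List.drop_drop]
            simp [heq, hdrop1, htail]
          rw [ih cs (index + 2) _ (by omega), hdrop2, hd, htail]
          subst hstar
          simp [finishB, stepB, List.foldl]
        · rw [if_neg hstar]
          rw [ih cs (index + 1) _ (by omega), hdrop1, htail, hd]
          simp [finishB, stepB, List.foldl, hstar]

-- ===== VERDICT (by name: the statement is the Claim_ definition above) =====
theorem splitPatternIntoMinorPattern_spec : Claim_equal_splitPatternIntoMinorPattern := by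
  intro p _
  unfold Spec_splitPatternIntoMinorPattern splitPatternIntoMinorPattern splitPatternIntoMinorPattern_alt
  rw [splitLoopA_eq_fold p.toList.length p.toList 0 [] (by omega)]
  simp
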